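-- pv_equiv track=rewrite | github.com/hubertdepsv/ls | py110/itwpractice/19.py | odd_fellow
-- ===== SOURCE A (Python) =====
-- def odd_fellow(lst):
--     # compute frequencies
--     frequencies = {}
--     for num in lst:
--         if str(num) in frequencies.keys():
--             frequencies[str(num)] += 1
--         else:
--             frequencies[str(num)] = 1
--
--     for num in frequencies.keys():
--         if frequencies[num] % 2 == 1:
--             return int(num)
-- ===== SOURCE B (Python) =====
-- def odd_fellow(lst):
--     seen = set()
--     for num in lst:
--         if str(num) not in seen:
--             if sum(1 for x in lst if str(x) == str(num)) % 2 == 1: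
--                 return int(str(num))
--             seen.add(str(num))
-- ===== Notes on version B (the rewrite author's own statement) =====
-- stated objective: alternative
-- what changed: Replaces the frequency-dictionary build plus key scan with a single pass over the list that keeps a 'seen' set and, for each first occurrence, counts its occurrences by an inner rescan of the whole list, returning immediately when the count is odd.
import Mathlib
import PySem

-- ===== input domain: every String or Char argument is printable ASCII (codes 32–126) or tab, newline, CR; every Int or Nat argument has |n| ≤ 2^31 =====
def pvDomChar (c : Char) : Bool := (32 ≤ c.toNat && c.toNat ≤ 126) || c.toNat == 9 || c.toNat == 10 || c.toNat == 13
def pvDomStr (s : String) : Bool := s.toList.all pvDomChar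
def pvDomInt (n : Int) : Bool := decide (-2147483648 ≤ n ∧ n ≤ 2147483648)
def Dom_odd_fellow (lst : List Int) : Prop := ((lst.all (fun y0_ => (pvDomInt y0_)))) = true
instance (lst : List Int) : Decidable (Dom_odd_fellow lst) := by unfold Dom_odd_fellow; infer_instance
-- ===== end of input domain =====

-- B replaces A's frequency-dictionary build + key scan by a single pass keeping a 'seen'
-- set of str-keys, counting each first occurrence by an inner rescan of the list (alternative
-- decomposition, not faster); both return int(str(num)) of the first str-key with odd count.

-- ===== PORT A =====
-- second loop of A: 'for num in frequencies.keys(): if frequencies[num] % 2 == 1: return int(num)'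
def oddScanA (freq : PySem.Dict String Int) : List String → Option Int
  | [] => none
  | num :: rest =>
    if PySem.Int.mod (freq.getD num 0) 2 == 1 then PySem.Int.ofStr? num
    else oddScanA freq rest

def odd_fellow (lst : List Int) : Option Int :=
  let frequencies := lst.foldl (fun d num =>
      if d.contains (PySem.Int.toStr num) then
        d.modify (PySem.Int.toStr num) 0 (· + 1)
      else
        d.insert (PySem.Int.toStr num) 1) PySem.Dict.empty
  oddScanA frequencies frequencies.keys

-- ===== PORT B =====
def altLoop (lst : List Int) : List Int → PySem.Set String → Option Int
  | [], _ => none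
  | num :: rest, seen =>
    if seen.contains (PySem.Int.toStr num) then altLoop lst rest seen
    else if PySem.Int.mod ((lst.countP (fun x => PySem.Int.toStr x == PySem.Int.toStr num) : Int)) 2 == 1 then
      PySem.Int.ofStr? (PySem.Int.toStr num)
    else altLoop lst rest (seen.add (PySem.Int.toStr num))

def odd_fellow_alt (lst : List Int) : Option Int := altLoop lst lst PySem.Set.empty

-- ===== PRECONDITION & SPEC =====
def Spec_odd_fellow (lst : List Int) (out : Option Int) : Prop := out = odd_fellow_alt lst
instance (lst : List Int) (out : Option Int) : Decidable (Spec_odd_fellow lst out) := by unfold Spec_odd_fellow; infer_instance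

-- ===== CLAIM (what is proved, stated in full; the proofs are below) =====
def Claim_equal_odd_fellow : Prop := ∀ (lst : List Int), Dom_odd_fellow lst → Spec_odd_fellow lst (odd_fellow lst)

-- ===== LEMMAS AND PROOFS =====

-- proof-side view of the shared scan: first string key with odd multiplicity in lst.map toStr
def scanK (lst : List Int) : List String → Option Int
  | [] => none
  | k :: ks =>
    if PySem.Int.mod (((lst.map PySem.Int.toStr).count k : Int)) 2 == 1 then PySem.Int.ofStr? k
    else scanK lst ks

-- the fresh keys contributed by ks when 'seen' strings are skipped, in first-occurrence order
def newK (seen : PySem.Set String) : List String → List String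
  | [] => []
  | k :: ks => if seen.contains k then newK seen ks else k :: newK (seen.add k) ks

theorem stepA_eq (d : PySem.Dict String Int) (num : Int) :
    (if d.contains (PySem.Int.toStr num) then d.modify (PySem.Int.toStr num) 0 (· + 1)
     else d.insert (PySem.Int.toStr num) 1)
    = d.insert (PySem.Int.toStr num) (d.getD (PySem.Int.toStr num) 0 + 1) := by
  by_cases h : d.contains (PySem.Int.toStr num) = true
  · simp [h, PySem.Dict.modify]
  · simp only [Bool.not_eq_true] at h
    rw [if_neg (by simp [h]), PySem.Dict.getD_of_not_contains d 0 h, zero_add]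

theorem foldA_eq_counter (lst : List Int) :
    lst.foldl (fun d num =>
      if d.contains (PySem.Int.toStr num) then d.modify (PySem.Int.toStr num) 0 (· + 1)
      else d.insert (PySem.Int.toStr num) 1) PySem.Dict.empty
    = PySem.Dict.counter (lst.map PySem.Int.toStr) := by
  rw [← PySem.Dict.foldl_insert_getD_add_one_eq_counter, List.foldl_map]
  exact PySem.List.foldl_congr_mem lst _ _ _ fun d num _ => stepA_eq d num

theorem oddScanA_counter (lst : List Int) (ks : List String) :
    oddScanA (PySem.Dict.counter (lst.map PySem.Int.toStr)) ks = scanK lst ks := by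
  induction ks with
  | nil => rfl
  | cons k ks ih => simp only [oddScanA, scanK, PySem.Dict.getD_counter, ih]

theorem foldl_add_eq_newK (ks : List String) (s : PySem.Set String) :
    ks.foldl PySem.Set.add s = s ++ newK s ks := by
  induction ks generalizing s with
  | nil => simp [newK]
  | cons k ks ih =>
    simp only [List.foldl_cons, newK]
    by_cases h : k ∈ s
    · rw [if_pos (by simpa [PySem.Set.contains] using h),
        show PySem.Set.add s k = s from by simp [PySem.Set.add, h], ih]
    · rw [if_neg (by simpa [PySem.Set.contains] using h),
        show PySem.Set.add s k = s ++ [k] from by simp [PySem.Set.add, h], ih, List.append_assoc]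
      rfl

theorem countP_toStr (lst : List Int) (num : Int) :
    (lst.countP (fun x => PySem.Int.toStr x == PySem.Int.toStr num))
      = (lst.map PySem.Int.toStr).count (PySem.Int.toStr num) := by
  rw [List.count, List.countP_map]
  rfl

theorem altLoop_eq_scanK (lst rest : List Int) (seen : PySem.Set String) :
    altLoop lst rest seen = scanK lst (newK seen (rest.map PySem.Int.toStr)) := by
  induction rest generalizing seen with
  | nil => rfl
  | cons num rest ih =>
    simp only [altLoop, List.map_cons, newK]
    by_cases h : seen.contains (PySem.Int.toStr num) = true
    · rw [if_pos h]
      conv_rhs => rw [if_pos h]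
      exact ih seen
    · rw [if_neg h]
      conv_rhs => rw [if_neg h]
      simp only [scanK, countP_toStr]
      rw [ih]

-- ===== VERDICT (by name: the statement is the Claim_ definition above) =====
theorem odd_fellow_spec : Claim_equal_odd_fellow := by
  intro lst _
  unfold Spec_odd_fellow odd_fellow odd_fellow_alt
  simp only [foldA_eq_counter, PySem.Dict.keys_counter, oddScanA_counter, altLoop_eq_scanK]
  rw [show PySem.Set.ofList (lst.map PySem.Int.toStr)
        = newK PySem.Set.empty (lst.map PySem.Int.toStr) from
      by rw [PySem.Set.ofList, foldl_add_eq_newK]; rfl]
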